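-- pv_equiv track=rewrite | github.com/MustidMeyers/AS91897 | 2/Using Questions Test.py | remove_list_features_for_player_info
-- ===== SOURCE A (Python) =====
-- def remove_list_features_for_player_info(playerInfo):
--     for i in range(0,len(playerInfo)):
--         playerInfo = playerInfo.replace("[","")
--     for i in range(0,len(playerInfo)):
--         playerInfo = playerInfo.replace("]","")
--     for i in range(0,len(playerInfo)):
--         playerInfo = playerInfo.replace(",","\n")
--     for i in range(0,len(playerInfo)):
--         playerInfo = playerInfo.replace("'","")
--     for i in range(0,len(playerInfo)):
--         playerInfo = playerInfo.replace(" ","")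
--     return playerInfo
-- ===== SOURCE B (Python) =====
-- def remove_list_features_for_player_info(playerInfo):
--     out = []
--     for ch in playerInfo:
--         if ch in "[]' ":
--             continue
--         out.append('\n' if ch == ',' else ch)
--     return ''.join(out)
-- ===== Notes on version B (the rewrite author's own statement) =====
-- stated objective: faster
-- what changed: Replaces A's five loops that call a full-string replace once per character position with a single linear pass over the characters that drops the bracket, quote and space characters and maps each comma to a newline.
import Mathlib
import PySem

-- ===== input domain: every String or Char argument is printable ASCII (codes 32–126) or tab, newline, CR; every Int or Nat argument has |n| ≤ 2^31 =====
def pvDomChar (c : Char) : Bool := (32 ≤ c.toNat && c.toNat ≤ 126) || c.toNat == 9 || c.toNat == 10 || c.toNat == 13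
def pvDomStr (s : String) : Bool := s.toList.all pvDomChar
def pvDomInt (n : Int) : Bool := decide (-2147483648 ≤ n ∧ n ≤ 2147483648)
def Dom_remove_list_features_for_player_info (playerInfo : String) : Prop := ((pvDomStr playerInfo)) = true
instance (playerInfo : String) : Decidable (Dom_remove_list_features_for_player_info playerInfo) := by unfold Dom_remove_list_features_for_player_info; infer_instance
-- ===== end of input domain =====

-- B replaces A's five quadratic loops of repeated full-string replace calls by one linear
-- character pass dropping the bracket/quote/space characters and mapping commas to newlines;
-- return values proved equal on all inputs.

-- ===== PORT A =====
-- 'for i in range(0, len(s)): s = s.replace(old, new)' — the range is evaluated once, on the length at loop entry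
def pvLoopReplace (s : List Char) (old new : List Char) : List Char :=
  (PySem.List.pyRange 0 (s.length : Int) 1).foldl (fun acc _ => PySem.Chars.replace acc old new) s

def remove_list_features_for_player_info (playerInfo : String) : String :=
  String.ofList
    (pvLoopReplace
      (pvLoopReplace
        (pvLoopReplace
          (pvLoopReplace
            (pvLoopReplace playerInfo.toList ['['] [])
            [']'] [])
          [','] ['\n'])
        ['\''] [])
      [' '] [])

-- ===== PORT B =====
def remove_list_features_for_player_info_alt (playerInfo : String) : String :=
  String.ofList (playerInfo.toList.foldl
    (fun acc c =>
      if c = '[' ∨ c = ']' ∨ c = '\'' ∨ c = ' ' then acc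
      else acc ++ [if c = ',' then '\n' else c]) [])

-- ===== PRECONDITION & SPEC =====
def Spec_remove_list_features_for_player_info (playerInfo : String) (out : String) : Prop := out = remove_list_features_for_player_info_alt playerInfo
instance (playerInfo : String) (out : String) : Decidable (Spec_remove_list_features_for_player_info playerInfo out) := by unfold Spec_remove_list_features_for_player_info; infer_instance

-- ===== CLAIM (what is proved, stated in full; the proofs are below) =====
def Claim_equal_remove_list_features_for_player_info : Prop := ∀ (playerInfo : String), Dom_remove_list_features_for_player_info playerInfo → Spec_remove_list_features_for_player_info playerInfo (remove_list_features_for_player_info playerInfo)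

-- ===== LEMMAS AND PROOFS =====

-- the per-character substitution a one-character replace performs
def pvSub (t : Char) (r : List Char) (c : Char) : List Char := if c = t then r else [c]

lemma replace_go_single (t : Char) (r : List Char) :
    ∀ (l : List Char) (fuel : Nat) (acc : List Char), l.length ≤ fuel →
      PySem.Chars.replace.go [t] r fuel l acc = acc.reverse ++ l.flatMap (pvSub t r) := by
  intro l
  induction l with
  | nil => intro fuel acc _; cases fuel <;> simp [PySem.Chars.replace.go]
  | cons c tl ih =>
    intro fuel acc h
    cases fuel with
    | zero => simp at h
    | succ n =>
      have htl : tl.length ≤ n := by simpa using h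
      by_cases hc : c = t
      · have hp : List.isPrefixOf [t] (c :: tl) = true := by
          simp [List.isPrefixOf, hc]
        simp only [PySem.Chars.replace.go, hp, if_pos, List.length_cons,
          List.length_nil, List.drop_succ_cons, List.drop_zero]
        rw [ih n (r.reverse ++ acc) htl]
        simp [pvSub, hc, List.flatMap_cons]
      · have hp : List.isPrefixOf [t] (c :: tl) = false := by
          simp [List.isPrefixOf]
          intro he; exact absurd he.symm hc
        simp only [PySem.Chars.replace.go, hp, Bool.false_eq_true, if_false]
        rw [ih n (c :: acc) htl]
        simp [pvSub, hc, List.flatMap_cons]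

lemma replace_single (s : List Char) (t : Char) (r : List Char) :
    PySem.Chars.replace s [t] r = s.flatMap (pvSub t r) := by
  have : ([t] : List Char).isEmpty = false := rfl
  simp only [PySem.Chars.replace, this, Bool.false_eq_true, if_false]
  simpa using replace_go_single t r s s.length [] le_rfl

lemma flatMap_sub_of_not_mem (t : Char) (r l : List Char) (h : t ∉ l) :
    l.flatMap (pvSub t r) = l := by
  induction l with
  | nil => simp
  | cons x xs ih =>
    have hx : x ≠ t := fun he => h (he ▸ List.mem_cons_self)
    simp only [List.flatMap_cons, pvSub, if_neg hx, List.singleton_append, List.cons.injEq, true_and]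
    exact ih (fun he => h (List.mem_cons_of_mem _ he))

lemma sub_idem {t : Char} {r : List Char} (ht : t ∉ r) (s : List Char) :
    (s.flatMap (pvSub t r)).flatMap (pvSub t r) = s.flatMap (pvSub t r) := by
  induction s with
  | nil => simp
  | cons c tl ih =>
    simp only [List.flatMap_cons, List.flatMap_append, ih]
    congr 1
    by_cases hc : c = t
    · simp only [pvSub, if_pos hc]
      exact flatMap_sub_of_not_mem t r r ht
    · simp [pvSub, hc]

lemma foldl_idem {α β : Type} (g : α → α) (hg : ∀ x, g (g x) = g x) :
    ∀ (l : List β) (s : α), l ≠ [] → l.foldl (fun a _ => g a) s = g s := by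
  intro l
  induction l with
  | nil => intro s h; exact absurd rfl h
  | cons b bs ih =>
    intro s _
    cases bs with
    | nil => rfl
    | cons b' bs' =>
      rw [List.foldl_cons, ih (g s) (by simp), hg]

lemma loop_eq (s : List Char) (t : Char) (r : List Char) (ht : t ∉ r) :
    pvLoopReplace s [t] r = s.flatMap (pvSub t r) := by
  unfold pvLoopReplace
  have hfun : (fun (acc : List Char) (_ : Int) => PySem.Chars.replace acc [t] r)
      = fun acc _ => acc.flatMap (pvSub t r) := by
    funext acc i; exact replace_single acc t r
  rw [hfun]
  cases s with
  | nil => simp [PySem.List.pyRange]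
  | cons c tl =>
    have hne : PySem.List.pyRange 0 ((c :: tl).length : Int) 1 ≠ [] := by
      rw [PySem.List.pyRange_one_cons (by simp)]
      exact List.cons_ne_nil _ _
    exact foldl_idem _ (sub_idem ht) _ _ hne

-- per-character value of the five composed substitutions
lemma comp_char (c : Char) :
    ((((pvSub '[' [] c).flatMap (pvSub ']' [])).flatMap (pvSub ',' ['\n'])).flatMap
        (pvSub '\'' [])).flatMap (pvSub ' ' [])
      = if c = '[' ∨ c = ']' ∨ c = '\'' ∨ c = ' ' then []
        else [if c = ',' then '\n' else c] := by
  by_cases h1 : c = '['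
  · simp [pvSub, h1]
  by_cases h2 : c = ']'
  · simp [pvSub, h2]
  by_cases h3 : c = ','
  · simp [pvSub, h3]
  by_cases h4 : c = '\''
  · simp [pvSub, h4]
  by_cases h5 : c = ' '
  · simp [pvSub, h5]
  · simp [pvSub, h1, h2, h3, h4, h5]

-- ===== VERDICT (by name: the statement is the Claim_ definition above) =====
theorem remove_list_features_for_player_info_spec : Claim_equal_remove_list_features_for_player_info := by
  intro playerInfo _
  unfold Spec_remove_list_features_for_player_info
  unfold remove_list_features_for_player_info remove_list_features_for_player_info_alt
  rw [loop_eq _ _ _ (by simp), loop_eq _ _ _ (by simp), loop_eq _ _ _ (by simp),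
      loop_eq _ _ _ (by simp), loop_eq _ _ _ (by simp)]
  have hB : (fun (acc : List Char) (c : Char) =>
      if c = '[' ∨ c = ']' ∨ c = '\'' ∨ c = ' ' then acc
      else acc ++ [if c = ',' then '\n' else c])
      = fun acc c => acc ++ (if c = '[' ∨ c = ']' ∨ c = '\'' ∨ c = ' '
          then [] else [if c = ',' then '\n' else c]) := by
    funext acc c; split <;> simp
  rw [hB, PySem.List.foldl_append_eq_flatMap]
  simp only [List.nil_append]
  congr 1
  induction playerInfo.toList with
  | nil => simp
  | cons c cs ih =>
    simp only [List.flatMap_cons, List.flatMap_append, ih]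
    rw [comp_char c]
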